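-- pv_equiv track=rewrite | github.com/mattjklassen/words | edges.py | subalphas
-- ===== SOURCE A (Python) =====
-- def remove_i(alpha, i):
-- # Removes the character at the i-th index of a string.
--   if not 0 <= i < len(alpha):
--         raise IndexError("Index is out of bounds")
--   return alpha[:i] + alpha[i+1:]
--
-- def subalphas(alpha):
--     n = len(alpha)
--     subs = []
--     previous = ""
--     for i in range(n):
--         if alpha[i] != previous:
--             new = remove_i(alpha, i)
--             subs.append(new)
--         previous = alpha[i]
--     return subs
-- ===== SOURCE B (Python) =====
-- def subalphas(alpha):
--     # pass 1: run-length encode alpha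
--     runs = []
--     for c in alpha:
--         if runs and runs[-1][0] == c:
--             runs[-1] = (c, runs[-1][1] + 1)
--         else:
--             runs.append((c, 1))
--     # pass 2: rebuild one string per run from the encoding, shortening that run by one:
--     # out[i] = (pieces before i) + piece i minus one char + (pieces after i),
--     # using precomputed prefix and suffix concatenations.
--     pieces = [c * k for c, k in runs]
--     pre = ['']
--     for p in pieces:
--         pre.append(pre[-1] + p)
--     suf = ['']
--     for p in reversed(pieces):
--         suf.append(p + suf[-1])
--     suf.reverse()
--     return [pre[i] + pieces[i][1:] + suf[i + 1] for i in range(len(runs))]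
-- ===== Notes on version B (the rewrite author's own statement) =====
-- stated objective: alternative
-- what changed: B works in staged passes: it first run-length encodes the string into (char,count) pairs, then precomputes prefix and suffix concatenations of the run pieces and emits, for each run, prefix + piece-minus-one-char + suffix, instead of A's single index loop that slices the original string at each position whose char differs from the previous one.
import Mathlib
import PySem

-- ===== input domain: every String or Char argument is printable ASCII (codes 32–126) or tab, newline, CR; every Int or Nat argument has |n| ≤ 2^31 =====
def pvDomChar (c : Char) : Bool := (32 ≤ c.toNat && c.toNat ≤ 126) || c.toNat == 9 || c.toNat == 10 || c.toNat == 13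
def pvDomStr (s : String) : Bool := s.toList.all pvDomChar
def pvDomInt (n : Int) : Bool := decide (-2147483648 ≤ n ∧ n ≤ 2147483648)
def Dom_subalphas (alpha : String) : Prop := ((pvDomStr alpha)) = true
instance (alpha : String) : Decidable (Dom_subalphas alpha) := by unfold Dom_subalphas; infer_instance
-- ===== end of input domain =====

-- B replaces A's per-index slice loop by staged passes: run-length encode, then rebuild
-- one string per run from prefix/suffix concatenations of the run pieces
-- (objective: alternative, same cost).

-- ===== PORT A =====
-- remove_i(alpha, i) for 0 <= i < len(alpha): alpha[:i] + alpha[i+1:]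
def removeI (l : List Char) (i : Nat) : List Char := l.take i ++ l.drop (i + 1)

-- one iteration of A's for-loop; state = (subs, previous); previous="" ported as none
def stepA (l : List Char) (st : List String × Option Char) (i : Nat) : List String × Option Char :=
  let c := l.getD i ' '
  (if some c ≠ st.2 then st.1 ++ [String.mk (removeI l i)] else st.1, some c)

def subalphas (alpha : String) : List String :=
  let l := alpha.toList
  ((List.range l.length).foldl (stepA l) ([], (none : Option Char))).1

-- ===== PORT B =====
-- pass 1 loop body: extend the last run if its char matches, else start a new run
def rleStep (runs : List (Char × Nat)) (c : Char) : List (Char × Nat) :=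
  match runs.getLast? with
  | some (d, k) => if d = c then runs.dropLast ++ [(c, k + 1)] else runs ++ [(c, 1)]
  | none => [(c, 1)]

def subalphas_alt (alpha : String) : List String :=
  let runs := alpha.toList.foldl rleStep []
  let pieces := runs.map (fun p => List.replicate p.2 p.1)
  let pre := pieces.foldl (fun pr p => pr ++ [pr.getLastD [] ++ p]) [[]]
  let suf := (pieces.reverse.foldl (fun sf p => sf ++ [p ++ sf.getLastD []]) [[]]).reverse
  (List.range runs.length).map (fun i =>
    String.mk (pre.getD i [] ++ (pieces.getD i []).drop 1 ++ suf.getD (i + 1) []))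

-- ===== PRECONDITION & SPEC =====
def Spec_subalphas (alpha : String) (out : List String) : Prop := out = subalphas_alt alpha
instance (alpha : String) (out : List String) : Decidable (Spec_subalphas alpha out) := by unfold Spec_subalphas; infer_instance

-- ===== CLAIM =====
def Claim_equal_subalphas : Prop := ∀ (alpha : String), Dom_subalphas alpha → Spec_subalphas alpha (subalphas alpha)

-- ===== LEMMAS AND PROOFS =====

-- length of the maximal run of c at the head of t
def runLen (c : Char) : List Char → Nat
  | [] => 0
  | d :: t => if d = c then 1 + runLen c t else 0

-- run-at-a-time recursion computing A's result on the suffix of l at i (proof-side)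
def subalphasAltGo (l : List Char) (i : Nat) (rest : List Char) : List String :=
  match rest with
  | [] => []
  | c :: t =>
    let k := runLen c t
    String.mk (l.take i ++ l.drop (i + 1)) :: subalphasAltGo l (i + 1 + k) (t.drop k)
termination_by rest.length
decreasing_by simp

-- front-recursive run-length encoding (proof-side normal form of pass 1)
def rleF : List Char → List (Char × Nat)
  | [] => []
  | c :: t => (c, 1 + runLen c t) :: rleF (t.drop (runLen c t))
termination_by l => l.length
decreasing_by simp

def decode (rs : List (Char × Nat)) : List Char := rs.flatMap (fun p => List.replicate p.2 p.1)

-- B's i-th output, front-recursively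
def decodeShort : List (Char × Nat) → Nat → List Char
  | [], _ => []
  | (c, k) :: rs, 0 => List.replicate (k - 1) c ++ decode rs
  | (c, k) :: rs, i + 1 => List.replicate k c ++ decodeShort rs i

-- all outputs, front-recursively
def outs : List (Char × Nat) → List (List Char)
  | [] => []
  | (c, k) :: rs => (List.replicate (k - 1) c ++ decode rs) :: (outs rs).map (fun s => List.replicate k c ++ s)

lemma runLen_le (c : Char) (t : List Char) : runLen c t ≤ t.length := by
  induction t with
  | nil => simp [runLen]
  | cons d t ih => simp only [runLen]; split <;> simp <;> omega

lemma runLen_getD (c : Char) (t : List Char) : ∀ a < runLen c t, t.getD a ' ' = c := by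
  induction t with
  | nil => simp [runLen]
  | cons d t ih =>
    intro a ha
    simp only [runLen] at ha
    split at ha
    · cases a with
      | zero => simpa [List.getD] using ‹d = c›
      | succ a' => simpa [List.getD] using ih a' (by omega)
    · omega

lemma runLen_drop_head (c : Char) (t : List Char) :
    ∀ d, (t.drop (runLen c t)).head? = some d → d ≠ c := by
  induction t with
  | nil => simp [runLen]
  | cons e t ih =>
    intro d hd
    simp only [runLen] at hd
    split at hd
    · rw [show 1 + runLen c t = runLen c t + 1 from by omega, List.drop_succ_cons] at hd
      exact ih d hd
    · simp at hd; subst hd; assumption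

lemma take_runLen (c : Char) (t : List Char) : t.take (runLen c t) = List.replicate (runLen c t) c := by
  induction t with
  | nil => simp [runLen]
  | cons d t ih =>
    simp only [runLen]
    split
    · rename_i h
      rw [show 1 + runLen c t = runLen c t + 1 from by omega]
      simp [List.replicate_succ, ih, h]
    · simp

lemma rleF_nil : rleF [] = [] := by rw [rleF]

lemma rleF_cons (c : Char) (t : List Char) :
    rleF (c :: t) = (c, 1 + runLen c t) :: rleF (t.drop (runLen c t)) := by rw [rleF]

-- ===== A-side: A's fold computes subalphasAltGo =====

lemma fold_acc (l : List Char) (xs : List Nat) :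
    ∀ (acc : List String) (prev : Option Char),
      xs.foldl (stepA l) (acc, prev)
        = (acc ++ (xs.foldl (stepA l) ([], prev)).1, (xs.foldl (stepA l) ([], prev)).2) := by
  induction xs with
  | nil => simp
  | cons x xs ih =>
    intro acc prev
    have hstep : stepA l (acc, prev) x
        = (acc ++ (stepA l ([], prev) x).1, (stepA l ([], prev) x).2) := by
      simp only [stepA]; split <;> simp
    simp only [List.foldl_cons, hstep]
    rw [ih (acc ++ (stepA l ([], prev) x).1) (stepA l ([], prev) x).2]
    conv_rhs => rw [show stepA l ([], prev) x
      = ((stepA l ([], prev) x).1, (stepA l ([], prev) x).2) from rfl]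
    rw [ih (stepA l ([], prev) x).1 (stepA l ([], prev) x).2]
    simp

lemma fold_run (l : List Char) (c : Char) :
    ∀ (k j : Nat) (acc : List String), (∀ a < k, l.getD (j + a) ' ' = c) →
      (List.range' j k).foldl (stepA l) (acc, some c) = (acc, some c) := by
  intro k
  induction k with
  | zero => simp
  | succ k ih =>
    intro j acc h
    rw [List.range'_succ]
    have h0 : l.getD j ' ' = c := by simpa using h 0 (by omega)
    have hstep : stepA l (acc, some c) j = (acc, some c) := by
      simp only [stepA]
      rw [h0]
      simp
    rw [List.foldl_cons, hstep]
    exact ih (j + 1) acc (fun a ha => by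
      have := h (a + 1) (by omega); simpa [Nat.add_assoc, Nat.add_comm 1 a] using this)

lemma getD_of_drop (l : List Char) (i : Nat) (c : Char) (t : List Char)
    (h : l.drop i = c :: t) : l.getD i ' ' = c := by
  have : (l.drop i)[0]? = l[i]? := by simp [List.getElem?_drop]
  rw [List.getD_eq_getElem?_getD, ← this, h]
  rfl

lemma drop_succ_of_drop (l : List Char) (i : Nat) (c : Char) (t : List Char)
    (h : l.drop i = c :: t) : l.drop (i + 1) = t := by
  have h2 := congrArg List.tail h
  rw [List.tail_drop] at h2
  simpa using h2

lemma main_inv (l : List Char) :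
    ∀ (n : Nat) (rest : List Char) (i : Nat) (prev : Option Char),
      rest.length ≤ n → l.drop i = rest →
      (∀ c, rest.head? = some c → prev ≠ some c) →
      ((List.range' i rest.length).foldl (stepA l) ([], prev)).1 = subalphasAltGo l i rest := by
  intro n
  induction n with
  | zero =>
    intro rest i prev hn hdrop _
    have : rest = [] := by
      cases rest with
      | nil => rfl
      | cons a b => simp at hn
    subst this; rw [subalphasAltGo.eq_def]; simp
  | succ n ih =>
    intro rest i prev hn hdrop hhead
    cases rest with
    | nil => rw [subalphasAltGo.eq_def]; simp
    | cons c t =>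
      have hk := runLen_le c t
      set k := runLen c t with hkdef
      have ht : l.drop (i + 1) = t := drop_succ_of_drop l i c t hdrop
      have hgd : l.getD i ' ' = c := getD_of_drop l i c t hdrop
      have hrun : ∀ a < k, l.getD (i + 1 + a) ' ' = c := by
        intro a ha
        have h1 : t.getD a ' ' = c := runLen_getD c t a ha
        have : l[i + 1 + a]? = t[a]? := by
          rw [← ht, List.getElem?_drop]
        rw [List.getD_eq_getElem?_getD, this, ← List.getD_eq_getElem?_getD, h1]
      have hlen : (c :: t).length = (1 + k) + (t.length - k) := by
        simp [List.length_cons]; omega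
      have hsplit : List.range' i ((c :: t).length)
          = List.range' i (1 + k) ++ List.range' (i + (1 + k)) (t.length - k) := by
        rw [hlen, ← List.range'_append_1]
      rw [hsplit, List.foldl_append]
      have hfirst : (List.range' i (1 + k)).foldl (stepA l) ([], prev)
          = ([String.mk (removeI l i)], some c) := by
        have : (1 + k) = k + 1 := by omega
        rw [this, List.range'_succ, List.foldl_cons]
        have hne : some c ≠ prev := fun h => hhead c rfl h.symm
        have : stepA l ([], prev) i = ([String.mk (removeI l i)], some c) := by
          simp only [stepA]
          rw [hgd]
          simp [hne]
        rw [this]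
        exact fold_run l c k (i + 1) _ hrun
      rw [hfirst]
      have hdrop2 : l.drop (i + (1 + k)) = t.drop k := by
        have h2 : (l.drop (i + 1)).drop k = l.drop (i + (1 + k)) := by
          rw [List.drop_drop]; congr 1; omega
        rw [← h2, ht]
      have hhead2 : ∀ d, (t.drop k).head? = some d → (some c : Option Char) ≠ some d := by
        intro d hd h
        exact runLen_drop_head c t d hd (by injection h with h'; exact h'.symm)
      have hlen2 : (t.drop k).length = t.length - k := by simp
      have hih := ih (t.drop k) (i + (1 + k)) (some c)
        (by simp [hlen2]; simp at hn; omega) hdrop2 hhead2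
      rw [fold_acc]
      rw [show i + (1 + k) = i + 1 + k by omega]
      rw [List.length_drop] at hih
      conv_rhs => rw [subalphasAltGo.eq_def]
      rw [show i + (1 + k) = i + 1 + k by omega] at hih
      simp [hih, removeI, ← hkdef]

-- ===== B-side pass 1: the foldl RLE equals the front recursion rleF =====

lemma rleStep_fold_inv :
    ∀ (n : Nat) (t : List Char) (rs : List (Char × Nat)) (c : Char) (m : Nat),
      t.length ≤ n →
      t.foldl rleStep (rs ++ [(c, m)])
        = rs ++ (c, m + runLen c t) :: rleF (t.drop (runLen c t)) := by
  intro n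
  induction n with
  | zero =>
    intro t rs c m hn
    have : t = [] := by cases t with | nil => rfl | cons a b => simp at hn
    subst this; simp [runLen, rleF_nil]
  | succ n ih =>
    intro t rs c m hn
    cases t with
    | nil => simp [runLen, rleF_nil]
    | cons d t' =>
      have hstep : rleStep (rs ++ [(c, m)]) d
          = if c = d then rs ++ [(d, m + 1)] else (rs ++ [(c, m)]) ++ [(d, 1)] := by
        simp only [rleStep, List.getLast?_concat]
        split <;> simp_all
      rw [List.foldl_cons, hstep]
      by_cases hcd : c = d
      · subst hcd
        rw [if_pos rfl]
        rw [ih t' rs c (m + 1) (by simp only [List.length_cons] at hn; omega)]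
        rw [show runLen c (c :: t') = runLen c t' + 1 from by simp [runLen]; omega]
        simp only [List.drop_succ_cons]
        rw [show m + 1 + runLen c t' = m + (runLen c t' + 1) from by omega]
      · rw [if_neg hcd]
        rw [ih t' (rs ++ [(c, m)]) d 1 (by simp only [List.length_cons] at hn; omega)]
        have hr : runLen c (d :: t') = 0 := by
          simp [runLen]; intro h; exact absurd h.symm hcd
        rw [hr]
        simp [rleF_cons]

lemma foldl_rleStep_eq_rleF (l : List Char) : l.foldl rleStep [] = rleF l := by
  cases l with
  | nil => simp [rleF]
  | cons c t =>
    rw [List.foldl_cons]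
    have h0 : rleStep [] c = [] ++ [(c, 1)] := by simp [rleStep]
    rw [h0, rleStep_fold_inv t.length t [] c 1 le_rfl]
    simp [rleF_cons, Nat.add_comm]

-- ===== B-side pass 2: prefix/suffix folds and the per-run rebuild =====

lemma preFold :
    ∀ (ps acc : List (List Char)) (L : List Char), acc.getLast? = some L →
      ps.foldl (fun pr p => pr ++ [pr.getLastD [] ++ p]) acc
        = acc ++ (List.range ps.length).map (fun i => L ++ (ps.take (i + 1)).flatten) := by
  intro ps
  induction ps with
  | nil => intro acc L _; simp
  | cons p ps ih =>
    intro acc L h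
    rw [List.foldl_cons]
    have hL : acc.getLastD [] = L := by simp [List.getLastD_eq_getLast?, h]
    rw [hL, ih (acc ++ [L ++ p]) (L ++ p) (by simp)]
    rw [List.length_cons, List.range_succ_eq_map, List.map_cons, List.map_map]
    simp only [List.take_succ_cons, List.flatten_cons, List.append_assoc, List.take_zero,
      List.flatten_nil, List.append_nil, List.singleton_append]
    simp

lemma sufFold :
    ∀ (ps acc : List (List Char)) (L : List Char), acc.getLast? = some L →
      ps.foldl (fun sf p => sf ++ [p ++ sf.getLastD []]) acc
        = acc ++ (List.range ps.length).map (fun i => ((ps.take (i + 1)).reverse).flatten ++ L) := by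
  intro ps
  induction ps with
  | nil => intro acc L _; simp
  | cons p ps ih =>
    intro acc L h
    rw [List.foldl_cons]
    have hL : acc.getLastD [] = L := by simp [List.getLastD_eq_getLast?, h]
    rw [hL, ih (acc ++ [p ++ L]) (p ++ L) (by simp)]
    rw [List.length_cons, List.range_succ_eq_map, List.map_cons, List.map_map]
    simp only [List.take_succ_cons, List.reverse_cons, List.flatten_append, List.flatten_cons,
      List.append_assoc, List.take_zero, List.reverse_nil, List.flatten_nil, List.nil_append,
      List.append_nil, List.singleton_append]
    simp

lemma getD_pre (ps : List (List Char)) (n i : Nat) (hn : ps.length = n) (hi : i ≤ n) :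
    ((([] : List Char) :: (List.range n).map (fun j => (ps.take (j + 1)).flatten)).getD i [])
      = (ps.take i).flatten := by
  cases i with
  | zero => simp
  | succ j =>
    rw [List.getD_cons_succ]
    have hj : j < n := by omega
    simp [List.getD_eq_getElem?_getD, List.getElem?_map, List.getElem?_range hj]

lemma getD_suf (ps : List (List Char)) (n i : Nat) (hn : ps.length = n) (hi : i < n) :
    ((([] : List Char) :: (List.range n).map
        (fun j => ((ps.reverse.take (j + 1)).reverse).flatten)).reverse.getD (i + 1) [])
      = (ps.drop (i + 1)).flatten := by
  have hlen : (([] : List Char) :: (List.range n).map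
      (fun j => ((ps.reverse.take (j + 1)).reverse).flatten)).length = n + 1 := by simp
  rw [List.getD_eq_getElem?_getD, List.getElem?_reverse (by rw [hlen]; omega)]
  rw [hlen]
  by_cases h : i + 1 = n
  · rw [show n + 1 - 1 - (i + 1) = 0 from by omega]
    rw [show i + 1 = n from h, ← hn]
    simp
  · rw [show n + 1 - 1 - (i + 1) = (n - i - 2) + 1 from by omega]
    rw [List.getElem?_cons_succ]
    have hj : n - i - 2 < n := by omega
    rw [List.getElem?_map, List.getElem?_range hj]
    simp only [Option.map_some, Option.getD_some]
    rw [show n - i - 2 + 1 = n - (i + 1) from by omega]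
    rw [List.take_reverse, List.reverse_reverse]
    rw [show ps.length - (n - (i + 1)) = i + 1 from by omega]

lemma altOut_eq :
    ∀ (rs : List (Char × Nat)) (i : Nat), i < rs.length →
      ((rs.map (fun p => List.replicate p.2 p.1)).take i).flatten
        ++ ((rs.map (fun p => List.replicate p.2 p.1)).getD i []).drop 1
        ++ ((rs.map (fun p => List.replicate p.2 p.1)).drop (i + 1)).flatten
      = decodeShort rs i := by
  intro rs
  induction rs with
  | nil => intro i hi; simp at hi
  | cons q rs ih =>
    intro i hi
    obtain ⟨c, k⟩ := q
    cases i with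
    | zero =>
      simp only [List.map_cons, List.take_zero, List.flatten_nil, List.nil_append,
        List.getD_cons_zero, List.drop_succ_cons, List.drop_zero]
      rw [List.drop_replicate]
      rw [decodeShort]
      simp [decode, List.flatMap_def]
    | succ j =>
      simp only [List.map_cons, List.take_succ_cons, List.flatten_cons, List.getD_cons_succ,
        List.drop_succ_cons, List.append_assoc]
      rw [show decodeShort ((c, k) :: rs) (j + 1) = List.replicate k c ++ decodeShort rs j from rfl]
      congr 1
      rw [← ih j (by simp only [List.length_cons] at hi; omega)]
      simp [List.append_assoc]

-- ===== both sides meet at `outs` =====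

lemma decode_rleF : ∀ (n : Nat) (t : List Char), t.length ≤ n → decode (rleF t) = t := by
  intro n
  induction n with
  | zero =>
    intro t hn
    have : t = [] := by cases t with | nil => rfl | cons a b => simp at hn
    subst this; simp [rleF_nil, decode]
  | succ n ih =>
    intro t hn
    cases t with
    | nil => simp [rleF_nil, decode]
    | cons c t' =>
      have hk := runLen_le c t'
      have hdec := ih (t'.drop (runLen c t'))
        (by simp only [List.length_cons] at hn; simp only [List.length_drop]; omega)
      rw [rleF_cons, decode, List.flatMap_cons]
      rw [decode] at hdec
      rw [hdec]
      show List.replicate (1 + runLen c t') c ++ _ = _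
      rw [show 1 + runLen c t' = runLen c t' + 1 from by omega, List.replicate_succ]
      simp only [List.cons_append, List.cons.injEq, true_and]
      conv_rhs => rw [← List.take_append_drop (runLen c t') t']
      rw [take_runLen]

lemma map_range_decodeShort (rs : List (Char × Nat)) :
    (List.range rs.length).map (decodeShort rs) = outs rs := by
  induction rs with
  | nil => simp [outs]
  | cons p rs ih =>
    obtain ⟨c, k⟩ := p
    rw [List.length_cons, List.range_succ_eq_map, List.map_cons, List.map_map]
    rw [outs]
    congr 1
    rw [← ih, List.map_map]
    apply List.map_congr_left
    intro i _
    simp [decodeShort, Function.comp]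

lemma go_eq_outs (l : List Char) :
    ∀ (n : Nat) (rest : List Char) (i : Nat), rest.length ≤ n → l.drop i = rest →
      subalphasAltGo l i rest = (outs (rleF rest)).map (fun s => String.mk (l.take i ++ s)) := by
  intro n
  induction n with
  | zero =>
    intro rest i hn _
    have : rest = [] := by cases rest with | nil => rfl | cons a b => simp at hn
    subst this; rw [subalphasAltGo.eq_def]; simp [rleF_nil, outs]
  | succ n ih =>
    intro rest i hn hdrop
    cases rest with
    | nil => rw [subalphasAltGo.eq_def]; simp [rleF_nil, outs]
    | cons c t =>
      have hk := runLen_le c t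
      set k := runLen c t with hkdef
      have ht : l.drop (i + 1) = t := drop_succ_of_drop l i c t hdrop
      have hdrop2 : l.drop (i + 1 + k) = t.drop k := by
        rw [← List.drop_drop, ht]
      rw [subalphasAltGo.eq_def]
      simp only [← hkdef]
      rw [rleF_cons]
      simp only [← hkdef]
      rw [outs, List.map_cons]
      congr 1
      · -- heads agree
        congr 2
        rw [ht]
        rw [show 1 + k - 1 = k from by omega]
        rw [decode_rleF (t.drop k).length _ le_rfl]
        conv_lhs => rw [← List.take_append_drop k t]
        rw [take_runLen, ← hkdef]
      · -- tails agree
        rw [ih (t.drop k) (i + 1 + k)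
          (by simp only [List.length_cons] at hn; simp only [List.length_drop]; omega) hdrop2]
        rw [List.map_map]
        apply List.map_congr_left
        intro s _
        simp only [Function.comp]
        congr 1
        have htake : l.take (i + 1 + k) = l.take i ++ List.replicate (1 + k) c := by
          rw [show i + 1 + k = i + (1 + k) from by omega, List.take_add, hdrop]
          congr 1
          rw [show (1 + k) = k + 1 from by omega]
          simp only [List.take_succ_cons]
          rw [show k + 1 = 1 + k from by omega] at *
          rw [show t.take k = List.replicate k c from by rw [hkdef]; exact take_runLen c t]
          rw [show 1 + k = k + 1 from by omega, List.replicate_succ]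
        rw [htake, List.append_assoc]

-- ===== VERDICT =====
theorem subalphas_spec : Claim_equal_subalphas := by
  intro alpha _
  unfold Spec_subalphas subalphas
  simp only [List.range_eq_range']
  rw [main_inv alpha.toList alpha.toList.length alpha.toList 0 none le_rfl (by simp)
    (by intro c _ h; cases h)]
  rw [go_eq_outs alpha.toList alpha.toList.length alpha.toList 0 le_rfl (by simp)]
  rw [← map_range_decodeShort (rleF alpha.toList), List.map_map]
  simp only [subalphas_alt, foldl_rleStep_eq_rleF]
  rw [preFold (((rleF alpha.toList).map (fun p => List.replicate p.2 p.1))) [[]] [] (by simp),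
    sufFold (((rleF alpha.toList).map (fun p => List.replicate p.2 p.1)).reverse) [[]] [] (by simp)]
  simp only [List.length_map, List.length_reverse, List.nil_append, List.append_nil,
    List.singleton_append]
  apply List.map_congr_left
  intro i hi
  rw [List.mem_range] at hi
  simp only [Function.comp, List.take_zero, List.nil_append]
  congr 1
  rw [getD_pre _ (rleF alpha.toList).length i (by simp) (by omega)]
  rw [getD_suf _ (rleF alpha.toList).length i (by simp) hi]
  exact (altOut_eq (rleF alpha.toList) i hi).symm
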